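-- pv_equiv track=rewrite | github.com/ZesRamal/Practicas-Backend-II | Algoritmo-Ordenamiento-Romano/algoritmo.py | calcular_valor
-- ===== SOURCE A (Python) =====
-- numeros_romanos = {"i":1,"v":5,"x":10,"l":50,"c":100,"d":500,"m":1000}
--
-- def calcular_valor(palabra, indice, valor_anadido, contador):
--     """
--     Calcula el valor numérico de una cadena de caracteres romanos dentro de la palabra.
--
--     Args:
--         palabra (str): La cadena a evaluar.
--         indice (int): El índice actual en la cadena.
--         valor_anadido (int): El valor acumulado hasta el momento.
--         contador (int): Contador para controlar la repetición de símbolos.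
--
--     Returns:
--         int: El valor numérico de la cadena de caracteres romanos.
--     """
--     if indice < len(palabra) and palabra[indice] in numeros_romanos:
--         letra = palabra[indice]
--         valor_letra = numeros_romanos[letra]
--         letra_anterior = palabra[indice - 1]
--         if indice > 0 and letra_anterior in numeros_romanos:
--             valor_letra_anterior = numeros_romanos[letra_anterior]
--             if letra in "ixcm" and contador != 2:
--                 if valor_letra > valor_letra_anterior and letra_anterior in "ixc" :
--                     valor_anadido += valor_letra - valor_letra_anterior * 2
--                 elif letra_anterior in "vld" and contador >= 1:
--                     return valor_anadido
--                 else: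
--                     valor_anadido += valor_letra
--                 if letra_anterior == letra:
--                     contador += 1
--                 else:
--                     contador = 0
--             elif letra in "vld" and letra_anterior != letra:
--                 if letra_anterior in "ixc" and contador <= 1 and valor_letra > valor_letra_anterior:
--                     valor_anadido += valor_letra - valor_letra_anterior * 2
--                     contador += 1
--                 elif valor_letra_anterior > valor_letra:
--                     valor_anadido += valor_letra
--         else:
--             valor_anadido += valor_letra
--         valor_anadido = calcular_valor(palabra,indice + 1, valor_anadido, contador)
--     return valor_anadido
-- ===== SOURCE B (Python) =====
-- numeros_romanos = {"i":1,"v":5,"x":10,"l":50,"c":100,"d":500,"m":1000}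
--
-- def calcular_valor(palabra, indice, valor_anadido, contador):
--     anterior = palabra[indice - 1] if 0 < indice <= len(palabra) else None
--     for letra in palabra[indice:]:
--         valor_letra = numeros_romanos.get(letra)
--         if valor_letra is None:
--             break
--         valor_anterior = numeros_romanos.get(anterior) if anterior is not None else None
--         if valor_anterior is None:
--             valor_anadido += valor_letra
--         elif letra in "ixcm" and contador != 2:
--             if valor_letra > valor_anterior and anterior in "ixc":
--                 valor_anadido += valor_letra - valor_anterior * 2
--             elif anterior in "vld" and contador >= 1:
--                 break
--             else:
--                 valor_anadido += valor_letra
--             contador = contador + 1 if anterior == letra else 0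
--         elif letra in "vld" and anterior != letra:
--             if anterior in "ixc" and contador <= 1 and valor_letra > valor_anterior:
--                 valor_anadido += valor_letra - valor_anterior * 2
--                 contador += 1
--             elif valor_anterior > valor_letra:
--                 valor_anadido += valor_letra
--         anterior = letra
--     return valor_anadido
-- ===== Notes on version B (the rewrite author's own statement) =====
-- stated objective: simpler
-- what changed: The tail recursion with repeated string indexing is replaced by a single iterative for-loop over the slice palabra[indice:] that carries the previous character in a local variable (no recursion depth limit, no per-step index arithmetic); the early return becomes a break.
-- outside the precondition, e.g. on calcular_valor('ab', -1, 0, 0): A returns 0, B returns 0; on calcular_valor('xiv', -2, 0, 0): A returns 20, B returns 4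
import Mathlib
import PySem

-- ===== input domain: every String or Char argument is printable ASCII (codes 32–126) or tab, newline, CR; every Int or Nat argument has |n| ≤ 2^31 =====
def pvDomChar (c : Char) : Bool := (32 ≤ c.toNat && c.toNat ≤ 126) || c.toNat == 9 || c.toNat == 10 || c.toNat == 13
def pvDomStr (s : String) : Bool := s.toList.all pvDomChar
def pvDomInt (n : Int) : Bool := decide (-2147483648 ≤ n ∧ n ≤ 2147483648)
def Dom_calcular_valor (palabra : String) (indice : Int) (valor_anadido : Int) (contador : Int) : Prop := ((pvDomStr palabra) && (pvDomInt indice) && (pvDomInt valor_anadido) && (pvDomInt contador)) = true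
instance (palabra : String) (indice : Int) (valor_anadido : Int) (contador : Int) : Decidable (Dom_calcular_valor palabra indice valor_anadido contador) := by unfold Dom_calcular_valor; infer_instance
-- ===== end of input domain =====

-- B replaces A's tail recursion with repeated indexing by one iterative pass over the
-- slice palabra[indice:] carrying the previous character in a variable (objective: simpler).
-- Pre_ excludes negative indice, where Python's negative-index wraparound makes A's
-- behaviour accidental (and A raises IndexError for indice <= -len on roman-starting input).


-- ===== PORT A =====
-- the module-level dict numeros_romanos (keys are single-character strings → Char)
def pvRomanos : List (Char × Int) :=
  [('i',1),('v',5),('x',10),('l',50),('c',100),('d',500),('m',1000)]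

-- literal transliteration of A's recursion; the Nat `fuel` argument only makes the
-- recursion structural (the wrapper passes len(palabra)-indice, exactly the number of
-- remaining steps, so it never runs out); pyGet? = Python indexing (none = IndexError,
-- which Pre_ excludes; the .getD fallbacks are only reached outside Pre_)
def pvCvARec (cs : List Char) (fuel : Nat) (indice : Int) (valor_anadido : Int) (contador : Int) : Int :=
  match fuel with
  | .zero => valor_anadido
  | .succ fuel =>
    if indice < (cs.length : Int) ∧
        ((PySem.List.pyGet? cs indice).bind (fun c => List.lookup c pvRomanos)).isSome then
      let letra := (PySem.List.pyGet? cs indice).getD ' '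
      let valor_letra := (List.lookup letra pvRomanos).getD 0
      let letra_anterior := (PySem.List.pyGet? cs (indice - 1)).getD ' '
      if indice > 0 ∧ (List.lookup letra_anterior pvRomanos).isSome then
        let valor_letra_anterior := (List.lookup letra_anterior pvRomanos).getD 0
        if letra ∈ ['i','x','c','m'] ∧ contador ≠ 2 then
          if valor_letra > valor_letra_anterior ∧ letra_anterior ∈ ['i','x','c'] then
            pvCvARec cs fuel (indice + 1) (valor_anadido + (valor_letra - valor_letra_anterior * 2))
              (if letra_anterior = letra then contador + 1 else 0)
          else if letra_anterior ∈ ['v','l','d'] ∧ contador ≥ 1 then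
            valor_anadido
          else
            pvCvARec cs fuel (indice + 1) (valor_anadido + valor_letra)
              (if letra_anterior = letra then contador + 1 else 0)
        else if letra ∈ ['v','l','d'] ∧ letra_anterior ≠ letra then
          if letra_anterior ∈ ['i','x','c'] ∧ contador ≤ 1 ∧ valor_letra > valor_letra_anterior then
            pvCvARec cs fuel (indice + 1) (valor_anadido + (valor_letra - valor_letra_anterior * 2))
              (contador + 1)
          else if valor_letra_anterior > valor_letra then
            pvCvARec cs fuel (indice + 1) (valor_anadido + valor_letra) contador
          else
            pvCvARec cs fuel (indice + 1) valor_anadido contador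
        else
          pvCvARec cs fuel (indice + 1) valor_anadido contador
      else
        pvCvARec cs fuel (indice + 1) (valor_anadido + valor_letra) contador
    else
      valor_anadido

def calcular_valor (palabra : String) (indice : Int) (valor_anadido : Int) (contador : Int) : Int :=
  pvCvARec palabra.toList ((palabra.toList.length : Int) - indice).toNat indice valor_anadido contador

-- ===== PORT B =====
-- literal transliteration of Source B's for-loop; anterior : Option Char is Source B's
-- `anterior` (None → none); break = returning valor_anadido
def pvCvBLoop (letras : List Char) (anterior : Option Char) (valor_anadido : Int) (contador : Int) : Int :=
  match letras with
  | [] => valor_anadido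
  | letra :: rest =>
    match List.lookup letra pvRomanos with
    | none => valor_anadido  -- break
    | some valor_letra =>
      match anterior.bind (fun c => List.lookup c pvRomanos), anterior with
      | some valor_anterior, some ant =>
        if letra ∈ ['i','x','c','m'] ∧ contador ≠ 2 then
          if valor_letra > valor_anterior ∧ ant ∈ ['i','x','c'] then
            pvCvBLoop rest (some letra) (valor_anadido + (valor_letra - valor_anterior * 2))
              (if ant = letra then contador + 1 else 0)
          else if ant ∈ ['v','l','d'] ∧ contador ≥ 1 then
            valor_anadido  -- break
          else
            pvCvBLoop rest (some letra) (valor_anadido + valor_letra)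
              (if ant = letra then contador + 1 else 0)
        else if letra ∈ ['v','l','d'] ∧ ant ≠ letra then
          if ant ∈ ['i','x','c'] ∧ contador ≤ 1 ∧ valor_letra > valor_anterior then
            pvCvBLoop rest (some letra) (valor_anadido + (valor_letra - valor_anterior * 2))
              (contador + 1)
          else if valor_anterior > valor_letra then
            pvCvBLoop rest (some letra) (valor_anadido + valor_letra) contador
          else
            pvCvBLoop rest (some letra) valor_anadido contador
        else
          pvCvBLoop rest (some letra) valor_anadido contador
      | _, _ =>
        pvCvBLoop rest (some letra) (valor_anadido + valor_letra) contador

def calcular_valor_alt (palabra : String) (indice : Int) (valor_anadido : Int) (contador : Int) : Int :=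
  let cs := palabra.toList
  let anterior : Option Char :=
    if 0 < indice ∧ indice ≤ (cs.length : Int) then PySem.List.pyGet? cs (indice - 1) else none
  pvCvBLoop (PySem.List.slice cs (some indice) none) anterior valor_anadido contador

-- ===== PRECONDITION & SPEC =====
-- Pre_ excludes indice < 0: there Python indexes from the string's end (wraparound), an
-- accidental behaviour on which A raises IndexError whenever indice < -len, or indice = -len
-- with a roman first character; where A does return on negative indice its value is a
-- wraparound artefact (see cites in claim.json).
def Pre_calcular_valor (palabra : String) (indice : Int) (valor_anadido : Int) (contador : Int) : Prop :=
  0 ≤ indice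
instance (palabra : String) (indice : Int) (valor_anadido : Int) (contador : Int) : Decidable (Pre_calcular_valor palabra indice valor_anadido contador) := by unfold Pre_calcular_valor; infer_instance

def pvWitness_calcular_valor : String × Int × Int × Int := ("iv", 0, 0, 0)

def Spec_calcular_valor (palabra : String) (indice : Int) (valor_anadido : Int) (contador : Int) (out : Int) : Prop := out = calcular_valor_alt palabra indice valor_anadido contador
instance (palabra : String) (indice : Int) (valor_anadido : Int) (contador : Int) (out : Int) : Decidable (Spec_calcular_valor palabra indice valor_anadido contador out) := by unfold Spec_calcular_valor; infer_instance

-- ===== CLAIM (what is proved, stated in full; the proofs are below) =====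
def Claim_equal_calcular_valor : Prop := ∀ (palabra : String) (indice : Int) (valor_anadido : Int) (contador : Int), Dom_calcular_valor palabra indice valor_anadido contador → Pre_calcular_valor palabra indice valor_anadido contador → Spec_calcular_valor palabra indice valor_anadido contador (calcular_valor palabra indice valor_anadido contador)

-- ===== LEMMAS AND PROOFS =====

-- B's `anterior` value at position n of the scan
def pvAntV (cs : List Char) (n : Nat) : Option Char :=
  if 0 < n ∧ n ≤ cs.length then cs[n-1]? else none

theorem pvAntV_succ (cs : List Char) (n : Nat) (h : n < cs.length) :
    pvAntV cs (n+1) = some cs[n] := by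
  unfold pvAntV
  rw [if_pos ⟨Nat.succ_pos n, Nat.succ_le_of_lt h⟩]
  simp [List.getElem?_eq_getElem h]

theorem pvMain (k : Nat) : ∀ (cs : List Char) (n : Nat) (acc cnt : Int), cs.length ≤ n + k →
    pvCvARec cs k (n : Int) acc cnt = pvCvBLoop (cs.drop n) (pvAntV cs n) acc cnt := by
  induction k with
  | zero =>
    intro cs n acc cnt hlen
    rw [List.drop_eq_nil_of_le (by omega)]
    rfl
  | succ k ih =>
    intro cs n acc cnt hlen
    rw [pvCvARec]
    by_cases hn : cs.length ≤ n
    · rw [if_neg (fun hc => absurd hc.1 (by omega)), List.drop_eq_nil_of_le hn]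
      rfl
    · replace hn : n < cs.length := by omega
      have hget : PySem.List.pyGet? cs (n : Int) = some cs[n] := by
        rw [PySem.List.pyGet?_natCast, List.getElem?_eq_getElem hn]
      have hdrop : cs.drop n = cs[n] :: cs.drop (n+1) := List.drop_eq_getElem_cons hn
      have hcast : (n : Int) + 1 = ((n+1 : Nat) : Int) := by push_cast; ring
      rw [hdrop]
      cases hl : List.lookup cs[n] pvRomanos with
      | none =>
        rw [if_neg (by simp [hget, hl])]
        simp [pvCvBLoop, hl]
      | some v =>
        rw [if_pos ⟨by omega, by simp [hget, hl]⟩]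
        simp only [hget, Option.getD_some, hl, pvCvBLoop]
        rcases Nat.eq_zero_or_pos n with hn0 | hn0
        · subst hn0
          have hant0 : pvAntV cs 0 = none := by simp [pvAntV]
          rw [if_neg (by simp), hant0]
          dsimp only [Option.bind]
          rw [show ((0:Nat) : Int) + 1 = ((1:Nat) : Int) by norm_num,
            ih cs 1 (acc + v) cnt (by omega), pvAntV_succ cs 0 hn]
        · have hant : PySem.List.pyGet? cs ((n : Int) - 1) = some cs[n-1] := by
            rw [show (n:Int) - 1 = ((n-1 : Nat) : Int) by omega, PySem.List.pyGet?_natCast,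
              List.getElem?_eq_getElem (by omega)]
          have hAnt : pvAntV cs n = some cs[n-1] := by
            unfold pvAntV
            rw [if_pos ⟨hn0, hn.le⟩, List.getElem?_eq_getElem (by omega)]
          simp only [hant, Option.getD_some, hAnt, Option.bind]
          cases hl2 : List.lookup cs[n-1] pvRomanos with
          | none =>
            rw [if_neg (by simp)]
            dsimp only
            rw [hcast, ih cs (n+1) (acc + v) cnt (by omega), pvAntV_succ cs n hn]
          | some vp =>
            have hcond : ((n : Int) > 0 ∧ (some vp).isSome = true) :=
              ⟨by exact_mod_cast hn0, rfl⟩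
            rw [if_pos hcond]
            dsimp only [Option.getD_some]
            split_ifs <;>
              first
                | rfl
                | (rw [hcast, ih cs (n+1) _ _ (by omega), pvAntV_succ cs n hn])

-- ===== VERDICT (by name: the statement is the Claim_ definition above) =====
theorem calcular_valor_spec : Claim_equal_calcular_valor := by
  intro palabra indice acc cnt _ hpre
  unfold Spec_calcular_valor calcular_valor calcular_valor_alt
  obtain ⟨n, rfl⟩ := Int.eq_ofNat_of_zero_le hpre
  simp only [PySem.List.slice_from_natCast]
  rw [pvMain ((palabra.toList.length : Int) - (n : Int)).toNat palabra.toList n acc cnt (by omega)]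
  congr 1
  simp only [pvAntV]
  by_cases h1 : 0 < n ∧ n ≤ palabra.toList.length
  · have h2 : (0 : Int) < (n : Int) ∧ (n : Int) ≤ (palabra.toList.length : Int) :=
      ⟨by exact_mod_cast h1.1, by exact_mod_cast h1.2⟩
    rw [if_pos h1, if_pos h2]
    have : (n:Int) - 1 = ((n-1 : Nat) : Int) := by omega
    rw [this, PySem.List.pyGet?_natCast]
  · rw [if_neg h1, if_neg (by omega)]
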